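-- pv_equiv track=rewrite | github.com/madsift/rumornet | lambda_deployment/agents/multilingual_kg_reasoning_agent.py | _extract_cultural_context
-- ===== SOURCE A (Python) =====
-- from typing import Dict, Any, Optional, List, Union
--
-- def _extract_cultural_context(response: str) -> List[str]:
--     """Extract cultural context notes from response."""
--     cultural_indicators = []
--
--     cultural_keywords = [
--         "cultural", "culture", "regional", "traditional", "social context",
--         "cultural sensitivity", "cultural assumption", "cultural bias",
--         "regional variation", "cultural norm", "social factor"
--     ]
--
--     for keyword in cultural_keywords:
--         if keyword.lower() in response.lower():
--             # Find sentences containing cultural keywords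
--             sentences = response.split('.')
--             for sentence in sentences:
--                 if keyword.lower() in sentence.lower():
--                     cultural_indicators.append(sentence.strip())
--                     break
--
--     return cultural_indicators[:3]  # Limit to top 3 cultural notes
-- ===== SOURCE B (Python) =====
-- def _extract_cultural_context(response):
--     """Extract cultural context notes from response."""
--     cultural_keywords = [
--         "cultural", "culture", "regional", "traditional", "social context",
--         "cultural sensitivity", "cultural assumption", "cultural bias",
--         "regional variation", "cultural norm", "social factor"
--     ]
--
--     first = {}
--     for sentence in response.split('.'):
--         low = sentence.lower()
--         for keyword in cultural_keywords:
--             if keyword not in first and keyword in low: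
--                 first[keyword] = sentence.strip()
--
--     return [first[keyword] for keyword in cultural_keywords if keyword in first][:3]
-- ===== Notes on version B (the rewrite author's own statement) =====
-- stated objective: simpler
-- what changed: One pass over the sentence list builds a keyword-to-first-matching-stripped-sentence index, replacing A's per-keyword rescan of the whole response plus re-split and rescan of the sentence list; the outer whole-response substring test disappears.
import Mathlib
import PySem

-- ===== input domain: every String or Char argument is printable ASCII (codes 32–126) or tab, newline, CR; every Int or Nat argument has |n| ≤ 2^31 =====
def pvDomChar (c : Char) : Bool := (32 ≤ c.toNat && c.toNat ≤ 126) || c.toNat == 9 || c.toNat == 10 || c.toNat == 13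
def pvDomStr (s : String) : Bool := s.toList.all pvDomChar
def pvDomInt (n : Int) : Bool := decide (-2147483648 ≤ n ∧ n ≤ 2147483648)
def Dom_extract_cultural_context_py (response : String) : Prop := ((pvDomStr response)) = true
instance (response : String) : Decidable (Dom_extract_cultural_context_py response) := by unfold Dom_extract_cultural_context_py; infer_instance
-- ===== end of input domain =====

-- B replaces A's per-keyword rescan of the whole response (and per-keyword re-split) by one pass over
-- the sentence list that builds a keyword -> first-matching-stripped-sentence index; simpler, same results.

-- the keyword list both Python versions write out literally
def pvKeywords : List String :=
  ["cultural", "culture", "regional", "traditional", "social context",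
   "cultural sensitivity", "cultural assumption", "cultural bias",
   "regional variation", "cultural norm", "social factor"]

-- ===== PORT A =====
-- inner 'for sentence in sentences: if …: append; break' loop of A
def pvInnerA (keyword : String) (acc : List String) : List String → List String
  | [] => acc
  | sentence :: rest =>
      if PySem.Str.isIn (PySem.Str.lower keyword) (PySem.Str.lower sentence) then
        acc ++ [PySem.Str.strip sentence]
      else pvInnerA keyword acc rest

def extract_cultural_context_py (response : String) : List String :=
  let cultural_indicators : List String :=
    pvKeywords.foldl (fun acc keyword =>
      if PySem.Str.isIn (PySem.Str.lower keyword) (PySem.Str.lower response) then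
        -- response.split('.'); the separator is the nonempty literal ".", so split? is never none
        let sentences := (PySem.Str.split? response ".").getD []
        pvInnerA keyword acc sentences
      else acc) []
  cultural_indicators.take 3

-- ===== PORT B =====
-- body of B's 'for sentence in response.split('.')' loop: one pass over the keywords, first hit recorded
def pvInnerB (d : PySem.Dict String String) (sentence : String) : PySem.Dict String String :=
  let low := PySem.Str.lower sentence
  pvKeywords.foldl (fun d keyword =>
    if !(d.contains keyword) && PySem.Str.isIn keyword low then
      d.insert keyword (PySem.Str.strip sentence)
    else d) d

def extract_cultural_context_py_alt (response : String) : List String :=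
  let first := ((PySem.Str.split? response ".").getD []).foldl pvInnerB PySem.Dict.empty
  (pvKeywords.filterMap (fun keyword => first.get? keyword)).take 3

-- ===== PRECONDITION & SPEC =====
def Spec_extract_cultural_context_py (response : String) (out : List String) : Prop := out = extract_cultural_context_py_alt response
instance (response : String) (out : List String) : Decidable (Spec_extract_cultural_context_py response out) := by unfold Spec_extract_cultural_context_py; infer_instance

-- ===== CLAIM (what is proved, stated in full; the proofs are below) =====
def Claim_equal_extract_cultural_context_py : Prop := ∀ (response : String), Dom_extract_cultural_context_py response → Spec_extract_cultural_context_py response (extract_cultural_context_py response)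

-- ===== LEMMAS AND PROOFS =====

-- the sentence list and the canonical "first sentence containing kw, stripped" function
def pvSents (response : String) : List String := (PySem.Str.split? response ".").getD []

def pvF (response kw : String) : Option String :=
  ((pvSents response).find? (fun s => PySem.Str.isIn kw (PySem.Str.lower s))).map PySem.Str.strip

-- every piece produced by Chars.splitOn.go is an infix of the original string,
-- given the invariant cur.reverse ++ l <:+ orig
lemma pvGoInfix (sep orig : List Char) :
    ∀ (fuel : Nat) (l cur : List Char) (acc : List (List Char)),
      (∀ p ∈ acc, p <:+: orig) → (cur.reverse ++ l) <:+ orig →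
      ∀ p ∈ PySem.Chars.splitOn.go sep fuel l cur acc, p <:+: orig := by
  intro fuel
  induction fuel with
  | zero =>
      intro l cur acc hacc hsuf p hp
      simp only [PySem.Chars.splitOn.go, List.mem_reverse, List.mem_cons] at hp
      rcases hp with rfl | hp
      · exact hsuf.isInfix
      · exact hacc p hp
  | succ n ih =>
      intro l cur acc hacc hsuf p hp
      cases l with
      | nil =>
          simp only [PySem.Chars.splitOn.go, List.mem_reverse, List.mem_cons] at hp
          rcases hp with rfl | hp
          · have h1 : cur.reverse <+: cur.reverse ++ ([] : List Char) := List.prefix_append _ _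
            simpa using (h1.isInfix.trans hsuf.isInfix)
          · exact hacc p hp
      | cons c rest =>
          simp only [PySem.Chars.splitOn.go] at hp
          by_cases hpre : sep.isPrefixOf (c :: rest) = true
          · simp only [hpre, if_true] at hp
            refine ih _ [] _ ?_ ?_ p hp
            · intro q hq
              rcases List.mem_cons.mp hq with rfl | hq
              · exact ((List.prefix_append cur.reverse (c :: rest)).isInfix.trans hsuf.isInfix)
              · exact hacc q hq
            · have h2 : List.drop sep.length (c :: rest) <:+ (c :: rest) := List.drop_suffix _ _
              simpa using h2.trans ((List.suffix_append cur.reverse (c :: rest)).trans hsuf)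
          · simp only [hpre] at hp
            refine ih rest (c :: cur) acc hacc ?_ p hp
            simpa using hsuf

-- every sentence of response.split('.') is an infix of response
lemma pvMemSentsInfix (response s : String) (hs : s ∈ pvSents response) :
    s.toList <:+: response.toList := by
  unfold pvSents at hs
  cases e : PySem.Str.split? response "." with
  | none =>
      exfalso
      have hmap := PySem.Str.split?_map response "."
      rw [e] at hmap
      simp [PySem.Chars.split?] at hmap
  | some xs =>
      rw [e] at hs
      simp only [Option.getD_some] at hs
      have hmap := PySem.Str.split?_map response "."
      rw [e] at hmap
      have hmap' : List.map String.toList xs = PySem.Chars.splitOn response.toList ".".toList := by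
        simpa [PySem.Chars.split?] using hmap
      have hmem : s.toList ∈ PySem.Chars.splitOn response.toList ".".toList := by
        rw [← hmap']
        exact List.mem_map.mpr ⟨s, hs, rfl⟩
      unfold PySem.Chars.splitOn at hmem
      refine pvGoInfix _ _ _ _ _ _ (by simp) ?_ _ hmem
      simp

-- a keyword found in a sentence is found in the whole response
lemma pvGuardOfSent (response kw s : String) (hs : s ∈ pvSents response)
    (h : PySem.Str.isIn kw (PySem.Str.lower s) = true) :
    PySem.Str.isIn kw (PySem.Str.lower response) = true := by
  rw [PySem.Str.isIn_iff_infix] at h ⊢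
  rw [PySem.Str.toList_lower] at h ⊢
  have hinf : s.toList <:+: response.toList := pvMemSentsInfix response s hs
  calc kw.toList <:+: PySem.Chars.lower s.toList := h
    _ <:+: PySem.Chars.lower response.toList := by
        unfold PySem.Chars.lower
        exact hinf.map _

-- ---- A side ----
lemma pvInnerA_eq (kw : String) (acc : List String) (ss : List String) :
    pvInnerA kw acc ss =
      acc ++ ((ss.find? (fun s => PySem.Str.isIn (PySem.Str.lower kw) (PySem.Str.lower s))).map PySem.Str.strip).toList := by
  induction ss generalizing acc with
  | nil => simp [pvInnerA]
  | cons s rest ih =>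
      simp only [pvInnerA]
      by_cases h : PySem.Str.isIn (PySem.Str.lower kw) (PySem.Str.lower s) = true
      · rw [if_pos h, List.find?_cons_of_pos (p := fun s => PySem.Str.isIn (PySem.Str.lower kw) (PySem.Str.lower s)) h]
        simp
      · rw [if_neg h, List.find?_cons_of_neg (p := fun s => PySem.Str.isIn (PySem.Str.lower kw) (PySem.Str.lower s)) h, ih]

def pvGA (response kw : String) : List String :=
  if PySem.Str.isIn (PySem.Str.lower kw) (PySem.Str.lower response) then
    (((pvSents response).find? (fun s => PySem.Str.isIn (PySem.Str.lower kw) (PySem.Str.lower s))).map PySem.Str.strip).toList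
  else []

lemma pvFoldA (response : String) (ks : List String) (acc : List String) :
    ks.foldl (fun acc keyword =>
      if PySem.Str.isIn (PySem.Str.lower keyword) (PySem.Str.lower response) then
        pvInnerA keyword acc ((PySem.Str.split? response ".").getD [])
      else acc) acc = acc ++ ks.flatMap (pvGA response) := by
  induction ks generalizing acc with
  | nil => simp
  | cons k rest ih =>
      simp only [List.foldl_cons, List.flatMap_cons]
      by_cases h : PySem.Str.isIn (PySem.Str.lower k) (PySem.Str.lower response) = true
      · have hk : pvGA response k =
            (((pvSents response).find? (fun s => PySem.Str.isIn (PySem.Str.lower k) (PySem.Str.lower s))).map PySem.Str.strip).toList := by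
          unfold pvGA; rw [if_pos h]
        rw [if_pos h, pvInnerA_eq, ih, hk, List.append_assoc]
        rfl
      · have hk : pvGA response k = [] := by unfold pvGA; rw [if_neg h]
        rw [if_neg h, ih, hk, List.nil_append]

-- for an actual keyword the outer 'keyword in response' guard is redundant and keyword.lower() = keyword
lemma pvGA_eq_F (response kw : String) (hkw : kw ∈ pvKeywords) :
    pvGA response kw = (pvF response kw).toList := by
  have hlow : PySem.Str.lower kw = kw := by
    have hall : ∀ k ∈ pvKeywords, PySem.Str.lower k = k := by decide
    exact hall kw hkw
  unfold pvGA pvF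
  rw [hlow]
  cases e : (pvSents response).find? (fun s => PySem.Str.isIn kw (PySem.Str.lower s)) with
  | none => simp
  | some s =>
      have hmem : s ∈ pvSents response := List.mem_of_find?_eq_some e
      have hp := List.find?_some e
      simp only at hp
      rw [if_pos (pvGuardOfSent response kw s hmem hp)]

lemma pvFlatMap_toList {α β : Type} (f : α → Option β) (g : α → List β) (l : List α)
    (h : ∀ x ∈ l, g x = (f x).toList) : l.flatMap g = l.filterMap f := by
  induction l with
  | nil => simp
  | cons x rest ih =>
      rw [List.flatMap_cons, List.filterMap_cons, h x (List.mem_cons_self),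
        ih (fun y hy => h y (List.mem_cons_of_mem _ hy))]
      cases f x <;> simp

-- ---- B side ----
-- the inner keyword loop touches only its own key
lemma pvInnerBfold_get_of_not_mem (low sv : String) (ks : List String) (kw : String)
    (hkw : kw ∉ ks) (d : PySem.Dict String String) :
    (ks.foldl (fun d k => if !(d.contains k) && PySem.Str.isIn k low then d.insert k sv else d) d).get? kw
      = d.get? kw := by
  induction ks generalizing d with
  | nil => rfl
  | cons k rest ih =>
      have hne : kw ≠ k := fun hh => hkw (hh ▸ List.mem_cons_self)
      rw [List.foldl_cons, ih (fun hh => hkw (List.mem_cons_of_mem _ hh))]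
      by_cases hc : (!(d.contains k) && PySem.Str.isIn k low) = true
      · rw [if_pos hc, PySem.Dict.get?_insert]
        simp [hne]
      · rw [if_neg hc]

lemma pvInnerBfold_get (low sv : String) (ks : List String) (kw : String)
    (hkw : kw ∈ ks) (hnd : ks.Nodup) (d : PySem.Dict String String) :
    (ks.foldl (fun d k => if !(d.contains k) && PySem.Str.isIn k low then d.insert k sv else d) d).get? kw
      = if !(d.contains kw) && PySem.Str.isIn kw low then some sv else d.get? kw := by
  induction ks generalizing d with
  | nil => cases hkw
  | cons k rest ih =>
      rcases List.mem_cons.mp hkw with rfl | hmem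
      · have hrest : kw ∉ rest := (List.nodup_cons.mp hnd).1
        rw [List.foldl_cons, pvInnerBfold_get_of_not_mem low sv rest kw hrest]
        by_cases hc : (!(d.contains kw) && PySem.Str.isIn kw low) = true
        · rw [if_pos hc, if_pos hc, PySem.Dict.get?_insert]; simp
        · rw [if_neg hc, if_neg hc]
      · have hne : kw ≠ k := by
          rintro rfl; exact (List.nodup_cons.mp hnd).1 hmem
        rw [List.foldl_cons, ih hmem (List.nodup_cons.mp hnd).2]
        by_cases hc : (!(d.contains k) && PySem.Str.isIn k low) = true
        · rw [if_pos hc]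
          have h1 : (d.insert k sv).get? kw = d.get? kw := by
            rw [PySem.Dict.get?_insert]; simp [hne]
          have h2 : (d.insert k sv).contains kw = d.contains kw := by
            rw [PySem.Dict.contains_insert]; simp [hne]
          rw [h1, h2]
        · rw [if_neg hc]

lemma pvFoldB (ss : List String) (kw : String) (hkw : kw ∈ pvKeywords)
    (d : PySem.Dict String String) :
    (ss.foldl pvInnerB d).get? kw
      = (d.get? kw).or (((ss.find? (fun s => PySem.Str.isIn kw (PySem.Str.lower s))).map PySem.Str.strip)) := by
  induction ss generalizing d with
  | nil => simp
  | cons s rest ih =>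
      rw [List.foldl_cons, ih]
      have hnd : pvKeywords.Nodup := by decide
      have hstep := pvInnerBfold_get (PySem.Str.lower s) (PySem.Str.strip s) pvKeywords kw hkw hnd d
      by_cases hin : PySem.Str.isIn kw (PySem.Str.lower s) = true
      · rw [List.find?_cons_of_pos (p := fun s => PySem.Str.isIn kw (PySem.Str.lower s)) hin]
        by_cases hc : d.contains kw = true
        · have hv : ∃ v, d.get? kw = some v := by
            rcases e : d.get? kw with _ | v
            · rw [PySem.Dict.get?_eq_none_iff_contains] at e; rw [hc] at e; cases e
            · exact ⟨v, rfl⟩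
          rcases hv with ⟨v, hv⟩
          have hB : (pvInnerB d s).get? kw = d.get? kw := by
            simp only [pvInnerB]
            rw [hstep, if_neg (by rw [hc]; simp)]
          rw [hB, hv]
          simp
        · have hcF : d.contains kw = false := Bool.eq_false_iff.mpr hc
          have hnone : d.get? kw = none := (PySem.Dict.get?_eq_none_iff_contains _ _).mpr hcF
          have hB : (pvInnerB d s).get? kw = some (PySem.Str.strip s) := by
            simp only [pvInnerB]
            rw [hstep, if_pos (by rw [hcF, hin]; rfl)]
          rw [hB, hnone]
          simp
      · have hinF : PySem.Str.isIn kw (PySem.Str.lower s) = false := Bool.eq_false_iff.mpr hin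
        rw [List.find?_cons_of_neg (p := fun s => PySem.Str.isIn kw (PySem.Str.lower s)) hin]
        have hB : (pvInnerB d s).get? kw = d.get? kw := by
          simp only [pvInnerB]
          rw [hstep, if_neg (by rw [hinF]; simp)]
        rw [hB]

lemma pvFilterMap_congr {α β : Type} (f g : α → Option β) (l : List α)
    (h : ∀ x ∈ l, f x = g x) : l.filterMap f = l.filterMap g := by
  induction l with
  | nil => rfl
  | cons x rest ih =>
      rw [List.filterMap_cons, List.filterMap_cons, h x (List.mem_cons_self),
        ih (fun y hy => h y (List.mem_cons_of_mem _ hy))]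

lemma pvMain (response : String) :
    extract_cultural_context_py response = extract_cultural_context_py_alt response := by
  unfold extract_cultural_context_py extract_cultural_context_py_alt
  simp only
  rw [pvFoldA, List.nil_append,
    pvFlatMap_toList (pvF response) (pvGA response) pvKeywords (fun kw hkw => pvGA_eq_F response kw hkw)]
  congr 1
  refine pvFilterMap_congr _ _ _ (fun kw hkw => ?_)
  rw [show ((PySem.Str.split? response ".").getD []) = pvSents response from rfl,
    pvFoldB (pvSents response) kw hkw, PySem.Dict.get?_empty]
  simp [pvF]

-- ===== VERDICT (by name: the statement is the Claim_ definition above) =====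
theorem extract_cultural_context_py_spec : Claim_equal_extract_cultural_context_py := by
  intro response _
  unfold Spec_extract_cultural_context_py
  exact pvMain response
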